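-- pv_equiv track=rewrite | github.com/miliar/Code_Jam_Webscraper | solutions_python/Problem_201/2858.py | calculateLR
-- ===== SOURCE A (Python) =====
-- def calculateLR(stalls):
--     values = []
--     for i in range(len(stalls)):
--         if stalls[i] == '0':
--             values.append((None,None,))
--         else:
--             L = len(stalls[:i].rsplit('0',1)[-1])
--             R = len(stalls[i+1:].split('0',1)[0])
--             values.append((L,R,))
--     return values
-- ===== SOURCE B (Python) =====
-- def calculateLR(stalls):
--     left = []
--     c = 0
--     for ch in stalls:
--         left.append(c)
--         c = c + 1 if ch != '0' else 0
--     right = []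
--     c = 0
--     for ch in reversed(stalls):
--         right.append(c)
--         c = c + 1 if ch != '0' else 0
--     right.reverse()
--     return [(None, None) if ch == '0' else (l, r)
--             for ch, (l, r) in zip(stalls, zip(left, right))]
-- ===== Notes on version B (the rewrite author's own statement) =====
-- stated objective: faster
-- what changed: Replaces the per-index string slicing/splitting (an O(n) scan for each of the n positions) with two linear counter passes (one forward, one over the reversed string) whose counters reset at each zero character, then a single zip to build the result.
import Mathlib
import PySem

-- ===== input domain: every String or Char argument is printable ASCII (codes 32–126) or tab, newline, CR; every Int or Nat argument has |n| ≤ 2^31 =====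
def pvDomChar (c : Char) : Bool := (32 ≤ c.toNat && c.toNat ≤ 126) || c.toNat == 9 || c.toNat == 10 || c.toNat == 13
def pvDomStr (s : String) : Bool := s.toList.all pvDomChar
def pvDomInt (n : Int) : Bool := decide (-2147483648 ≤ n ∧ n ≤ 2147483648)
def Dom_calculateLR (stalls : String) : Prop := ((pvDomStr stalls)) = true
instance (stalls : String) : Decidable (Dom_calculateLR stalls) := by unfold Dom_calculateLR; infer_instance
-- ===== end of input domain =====

-- B replaces A's per-index slicing/splitting with two linear counter passes resetting at each zero character (objective: faster; asymptotic).


-- ===== PORT A =====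
-- hand port (exact): s.rsplit('0', 1)[-1] = the part of s after its last '0' (all of s if no '0');
-- computed by a left fold that restarts at every '0' — exactly the segment rsplit isolates.
def rsplitLast0 (cs : List Char) : List Char :=
  cs.foldl (fun acc c => if c = '0' then [] else acc ++ [c]) []

-- hand port (exact): s.split('0', 1)[0] = the part of s before its first '0' (all of s if no '0').
def splitFirst0 (cs : List Char) : List Char :=
  cs.takeWhile (fun c => c ≠ '0')

def calculateLR (stalls : String) : List (Option Int × Option Int) :=
  let s := stalls.toList
  (PySem.List.pyRange 0 s.length 1).foldl (fun values i =>
    if PySem.List.pyGetD s i ' ' = '0' then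
      values ++ [(none, none)]
    else
      let L : Int := (rsplitLast0 (PySem.List.slice s none (some i))).length
      let R : Int := (splitFirst0 (PySem.List.slice s (some (i + 1)) none)).length
      values ++ [(some L, some R)]) []

-- ===== PORT B =====
-- one counter pass: returns (list of counter values before each char, final counter); counter resets at '0'
def countPass (cs : List Char) : List Int × Int :=
  cs.foldl (fun (p : List Int × Int) ch =>
    (p.1 ++ [p.2], if ch ≠ '0' then p.2 + 1 else 0)) ([], 0)

def calculateLR_alt (stalls : String) : List (Option Int × Option Int) :=
  let s := stalls.toList
  let left := (countPass s).1
  let right := (countPass s.reverse).1.reverse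
  (s.zip (left.zip right)).map (fun p =>
    if p.1 = '0' then (none, none) else (some p.2.1, some p.2.2))

-- ===== PRECONDITION & SPEC =====
def Spec_calculateLR (stalls : String) (out : List (Option Int × Option Int)) : Prop := out = calculateLR_alt stalls
instance (stalls : String) (out : List (Option Int × Option Int)) : Decidable (Spec_calculateLR stalls out) := by unfold Spec_calculateLR; infer_instance

-- ===== CLAIM (what is proved, stated in full; the proofs are below) =====
def Claim_equal_calculateLR : Prop := ∀ (stalls : String), Dom_calculateLR stalls → Spec_calculateLR stalls (calculateLR stalls)

-- ===== LEMMAS AND PROOFS =====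

theorem rsplitLast0_append (cs : List Char) (x : Char) :
    rsplitLast0 (cs ++ [x]) = if x = '0' then [] else rsplitLast0 cs ++ [x] := by
  simp [rsplitLast0]

-- the run fold equals the reversed '0'-free prefix of the reverse
theorem rsplitLast0_eq (cs : List Char) :
    rsplitLast0 cs = (cs.reverse.takeWhile (fun c => c ≠ '0')).reverse := by
  induction cs using List.reverseRecOn with
  | nil => simp [rsplitLast0]
  | append_singleton cs x ih =>
    rw [rsplitLast0_append, ih]
    by_cases h : x = '0' <;> simp [h]

-- the counter pass, characterised: the output list pairs each index with the run length
-- ending just before it, and the final counter is the run length of the whole list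
theorem countPass_eq (cs : List Char) :
    countPass cs =
      ((List.range cs.length).map (fun k => ((rsplitLast0 (cs.take k)).length : Int)),
       ((rsplitLast0 cs).length : Int)) := by
  induction cs using List.reverseRecOn with
  | nil => simp [countPass, rsplitLast0]
  | append_singleton cs x ih =>
    have step : countPass (cs ++ [x]) =
        ((countPass cs).1 ++ [(countPass cs).2],
         if x ≠ '0' then (countPass cs).2 + 1 else 0) := by
      simp [countPass]
    rw [step, ih]
    refine Prod.ext ?_ ?_
    · simp only [List.length_append, List.length_singleton, List.range_succ, List.map_append,
        List.map_cons, List.map_nil]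
      congr 1
      · exact List.map_congr_left (fun k hk => by
          rw [List.take_append_of_le_length (le_of_lt (List.mem_range.mp hk))])
      · rw [List.take_append_of_le_length (le_refl cs.length), List.take_length]
    · simp only [rsplitLast0_append]
      by_cases h : x = '0' <;> simp [h]

theorem length_countPass_fst (cs : List Char) : (countPass cs).1.length = cs.length := by
  rw [countPass_eq]; simp

theorem countPass_fst_getElem (cs : List Char) (k : Nat) (hk : k < cs.length) :
    (countPass cs).1[k]'(by rwa [length_countPass_fst]) =
      ((rsplitLast0 (cs.take k)).length : Int) := by
  simp [countPass_eq]

theorem calculateLR_spec_list (s : List Char) :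
    (PySem.List.pyRange 0 s.length 1).foldl (fun values i =>
      if PySem.List.pyGetD s i ' ' = '0' then
        values ++ [(none, none)]
      else
        let L : Int := (rsplitLast0 (PySem.List.slice s none (some i))).length
        let R : Int := (splitFirst0 (PySem.List.slice s (some (i + 1)) none)).length
        values ++ [((some L : Option Int), some R)]) [] =
    (s.zip (((countPass s).1).zip ((countPass s.reverse).1.reverse))).map (fun p =>
      if p.1 = '0' then (none, none) else (some p.2.1, some p.2.2)) := by
  -- fold the two-branch append into a single appended element, then the foldl is a map
  have hbody : (fun (values : List (Option Int × Option Int)) (i : Int) =>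
      if PySem.List.pyGetD s i ' ' = '0' then
        values ++ [((none : Option Int), (none : Option Int))]
      else
        let L : Int := (rsplitLast0 (PySem.List.slice s none (some i))).length
        let R : Int := (splitFirst0 (PySem.List.slice s (some (i + 1)) none)).length
        values ++ [((some L : Option Int), some R)]) =
      (fun values i => values ++
        [if PySem.List.pyGetD s i ' ' = '0' then ((none : Option Int), (none : Option Int))
         else (some ((rsplitLast0 (PySem.List.slice s none (some i))).length : Int),
               some ((splitFirst0 (PySem.List.slice s (some (i + 1)) none)).length : Int))]) := by
    funext values i
    split_ifs with h <;> simp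
  rw [hbody, PySem.List.foldl_append_singleton_eq_map, List.nil_append,
    PySem.List.pyRange_one]
  simp only [sub_zero, Int.toNat_natCast]
  apply List.ext_getElem
  · simp [length_countPass_fst]
  · intro k hk1 hk2
    simp only [List.length_map, List.length_range] at hk1
    simp only [List.getElem_map, List.getElem_range, List.getElem_zip]
    have hks : k < s.length := hk1
    have hkL : k < (countPass s).1.length := by rwa [length_countPass_fst]
    have hkR : k < (countPass s.reverse).1.reverse.length := by
      simp [length_countPass_fst]; exact hks
    -- index facts
    have hget : PySem.List.pyGetD s ((0 : Int) + (k : Int)) ' ' = s[k] := by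
      simp [PySem.List.pyGetD_natCast, List.getElem?_eq_getElem hks]
    have hsliceL : PySem.List.slice s none (some ((0 : Int) + (k : Int))) = s.take k := by
      simp [PySem.List.slice_to_natCast]
    have hsliceR : PySem.List.slice s (some ((0 : Int) + (k : Int) + 1)) none = s.drop (k + 1) := by
      have : (0 : Int) + (k : Int) + 1 = ((k + 1 : Nat) : Int) := by push_cast; ring
      rw [this, PySem.List.slice_from_natCast]
    have hleft : (countPass s).1[k]'hkL = ((rsplitLast0 (s.take k)).length : Int) :=
      countPass_fst_getElem s k hks
    have hright : (countPass s.reverse).1.reverse[k]'hkR =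
        ((splitFirst0 (s.drop (k + 1))).length : Int) := by
      have hrevlen : (countPass s.reverse).1.length = s.length := by
        rw [length_countPass_fst, List.length_reverse]
      have hidx : s.length - 1 - k < s.reverse.length := by
        simp; omega
      rw [List.getElem_reverse]
      simp only [hrevlen]
      rw [countPass_fst_getElem s.reverse (s.length - 1 - k) (by simpa using hidx)]
      have htake : s.reverse.take (s.length - 1 - k) = (s.drop (k + 1)).reverse := by
        rw [List.take_reverse]
        have hlen : s.length - (s.length - 1 - k) = k + 1 := by omega
        rw [hlen]
      rw [htake, rsplitLast0_eq, List.reverse_reverse]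
      simp [splitFirst0]
    rw [hget, hsliceL, hsliceR, hleft, hright]

-- ===== VERDICT (by name: the statement is the Claim_ definition above) =====
theorem calculateLR_spec : Claim_equal_calculateLR := by
  intro stalls _
  unfold Spec_calculateLR calculateLR calculateLR_alt
  exact calculateLR_spec_list stalls.toList
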